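-- pv_equiv track=rewrite | github.com/w3sqr/ProntoAIBot | features/ai_assistant.py | _clean_ai_response
-- ===== SOURCE A (Python) =====
-- def _clean_ai_response(text: str) -> str:
--     """Clean up AI response by removing unwanted markdown symbols and escaped characters"""
--     if not text:
--         return text
--
--     # Remove escaped characters
--     text = text.replace('\\/', '/').replace('\\*', '*').replace('\\_', '_')
--     text = text.replace('\\`', '`').replace('\\[', '[').replace('\\]', ']')
--     text = text.replace('\\(', '(').replace('\\)', ')').replace('\\#', '#')
--     text = text.replace('\\+', '+').replace('\\-', '-').replace('\\.', '.')
--     text = text.replace('\\!', '!').replace('\\|', '|')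
--
--     # Remove excessive markdown formatting
--     text = text.replace('**', '').replace('__', '').replace('*', '').replace('_', '')
--
--     # Clean up headers (remove # symbols but keep structure)
--     lines = text.split('\n')
--     cleaned_lines = []
--     for line in lines:
--         # Remove header symbols but keep the text
--         if line.strip().startswith('#'):
--             # Count # symbols and remove them, keeping the text
--             header_text = line.lstrip('#').strip()
--             if header_text:
--                 cleaned_lines.append(header_text)
--         else:
--             cleaned_lines.append(line)
--
--     return '\n'.join(cleaned_lines)
-- ===== SOURCE B (Python) =====
-- _ESC = set('/*_`[]()#+-.!|')
--
--
-- def _clean_line(line):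
--     if line.strip().startswith('#'):
--         header_text = line.lstrip('#').strip()
--         return header_text if header_text else None
--     return line
--
--
-- def _clean_ai_response(text: str) -> str:
--     """Clean up AI response in one left-to-right scan instead of 18 whole-string replace passes."""
--     out = []
--     i = 0
--     n = len(text)
--     while i < n:
--         c = text[i]
--         if c == '\\' and i + 1 < n and text[i + 1] in _ESC:
--             c = text[i + 1]
--             i += 2
--         else:
--             i += 1
--         if c != '*' and c != '_':
--             out.append(c)
--     cleaned_lines = [cl for cl in map(_clean_line, ''.join(out).split('\n')) if cl is not None]
--     return '\n'.join(cleaned_lines)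
-- ===== Notes on version B (the rewrite author's own statement) =====
-- stated objective: alternative
-- what changed: Replaces A's 18 sequential whole-string replace passes (13 backslash-unescapes fused with the */_ removals) by a single left-to-right character scan, and the header-cleanup append loop by a filtering map over the lines.
import Mathlib
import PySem

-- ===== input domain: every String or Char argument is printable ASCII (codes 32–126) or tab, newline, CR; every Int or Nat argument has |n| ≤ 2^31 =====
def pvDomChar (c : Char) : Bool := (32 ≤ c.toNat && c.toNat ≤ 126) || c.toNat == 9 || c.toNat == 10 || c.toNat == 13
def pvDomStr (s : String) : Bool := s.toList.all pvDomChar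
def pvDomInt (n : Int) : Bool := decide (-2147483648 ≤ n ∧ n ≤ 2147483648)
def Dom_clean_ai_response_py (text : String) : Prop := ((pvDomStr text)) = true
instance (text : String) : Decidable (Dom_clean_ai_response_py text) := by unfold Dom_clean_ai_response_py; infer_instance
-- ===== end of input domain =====

-- B replaces A's 18 sequential whole-string replace passes by one left-to-right scan; alternative decomposition, same results.

-- ===== PORT A =====
-- literal transliteration of A: chained replaces, then a header-cleanup loop.
-- line.lstrip('#') is ported as dropWhile (· == '#') (exact: lstrip with a char set drops leading chars of the set).
def clean_ai_response_py (text : String) : String :=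
  if text = "" then text
  else
    let t := text.toList
    let t := PySem.Chars.replace t ['\\', '/'] ['/']
    let t := PySem.Chars.replace t ['\\', '*'] ['*']
    let t := PySem.Chars.replace t ['\\', '_'] ['_']
    let t := PySem.Chars.replace t ['\\', '`'] ['`']
    let t := PySem.Chars.replace t ['\\', '['] ['[']
    let t := PySem.Chars.replace t ['\\', ']'] [']']
    let t := PySem.Chars.replace t ['\\', '('] ['(']
    let t := PySem.Chars.replace t ['\\', ')'] [')']
    let t := PySem.Chars.replace t ['\\', '#'] ['#']
    let t := PySem.Chars.replace t ['\\', '+'] ['+']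
    let t := PySem.Chars.replace t ['\\', '-'] ['-']
    let t := PySem.Chars.replace t ['\\', '.'] ['.']
    let t := PySem.Chars.replace t ['\\', '!'] ['!']
    let t := PySem.Chars.replace t ['\\', '|'] ['|']
    let t := PySem.Chars.replace t ['*', '*'] []
    let t := PySem.Chars.replace t ['_', '_'] []
    let t := PySem.Chars.replace t ['*'] []
    let t := PySem.Chars.replace t ['_'] []
    let lines := PySem.Chars.splitOn t ['\n']
    let cleaned := lines.foldl (fun acc line =>
      if PySem.Chars.startswith (PySem.Chars.strip line) ['#'] then
        let header := PySem.Chars.strip (line.dropWhile (· == '#'))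
        if header ≠ [] then acc ++ [header] else acc
      else acc ++ [line]) ([] : List (List Char))
    String.ofList (PySem.Chars.join ['\n'] cleaned)

-- ===== PORT B =====
def pvEsc : List Char := ['/', '*', '_', '`', '[', ']', '(', ')', '#', '+', '-', '.', '!', '|']

-- the single scan of Source B: unescape \c for c in the class, dropping '*' and '_' characters
def pvScanB : List Char → List Char
  | [] => []
  | [a] => if a = '*' ∨ a = '_' then [] else [a]
  | a :: b :: rest =>
    if a = '\\' ∧ b ∈ pvEsc then
      (if b = '*' ∨ b = '_' then pvScanB rest else b :: pvScanB rest)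
    else
      (if a = '*' ∨ a = '_' then pvScanB (b :: rest) else a :: pvScanB (b :: rest))

-- Source B's _clean_line (None ↦ none); lstrip('#') ported as dropWhile (· == '#') as in A
def pvCleanLine (line : List Char) : Option (List Char) :=
  if PySem.Chars.startswith (PySem.Chars.strip line) ['#'] then
    let header := PySem.Chars.strip (line.dropWhile (· == '#'))
    if header = [] then none else some header
  else some line

def clean_ai_response_py_alt (text : String) : String :=
  String.ofList (PySem.Chars.join ['\n']
    ((PySem.Chars.splitOn (pvScanB text.toList) ['\n']).filterMap pvCleanLine))

-- ===== PRECONDITION & SPEC =====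
def Spec_clean_ai_response_py (text : String) (out : String) : Prop := out = clean_ai_response_py_alt text
instance (text : String) (out : String) : Decidable (Spec_clean_ai_response_py text out) := by unfold Spec_clean_ai_response_py; infer_instance

-- ===== CLAIM (what is proved, stated in full; the proofs are below) =====
def Claim_equal_clean_ai_response_py : Prop := ∀ (text : String), Dom_clean_ai_response_py text → Spec_clean_ai_response_py text (clean_ai_response_py text)

-- ===== LEMMAS AND PROOFS =====

-- clean recursions equivalent to Chars.replace for 1- and 2-char patterns
def pvRep1 (x : Char) (nu : List Char) : List Char → List Char
  | [] => []
  | a :: t => if a = x then nu ++ pvRep1 x nu t else a :: pvRep1 x nu t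

def pvRep2 (x y : Char) (nu : List Char) : List Char → List Char
  | [] => []
  | [a] => [a]
  | a :: b :: t => if a = x ∧ b = y then nu ++ pvRep2 x y nu t else a :: pvRep2 x y nu (b :: t)

-- one-pass unescape for a set S of escapable characters
def pvScanS (S : List Char) : List Char → List Char
  | [] => []
  | [a] => [a]
  | a :: b :: t => if a = '\\' ∧ b ∈ S then b :: pvScanS S t else a :: pvScanS S (b :: t)

theorem pvRep1_go (x : Char) (nu : List Char) :
    ∀ fuel l acc, l.length ≤ fuel →
      PySem.Chars.replace.go [x] nu fuel l acc = acc.reverse ++ pvRep1 x nu l := by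
  intro fuel
  induction fuel with
  | zero => intro l acc h; simp at h; subst h; simp [PySem.Chars.replace.go, pvRep1]
  | succ n ih =>
    intro l acc h
    cases l with
    | nil => simp [PySem.Chars.replace.go, pvRep1]
    | cons c t =>
      simp only [List.length_cons] at h
      by_cases hc : c = x
      · have hp : List.isPrefixOf [x] (c :: t) = true := by simp [List.isPrefixOf, hc]
        simp only [PySem.Chars.replace.go, hp, if_true, pvRep1, if_pos hc]
        have hd : List.drop ([x].length) (c :: t) = t := by simp
        rw [hd, ih t _ (by omega)]
        simp
      · have hp : List.isPrefixOf [x] (c :: t) = false := by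
          simp [List.isPrefixOf]; intro hx; exact absurd hx.symm hc
        simp only [PySem.Chars.replace.go, hp, Bool.false_eq_true, if_false, pvRep1, if_neg hc]
        rw [ih t _ (by omega)]
        simp

theorem pvRep2_go (x y : Char) (nu : List Char) :
    ∀ fuel l acc, l.length ≤ fuel →
      PySem.Chars.replace.go [x, y] nu fuel l acc = acc.reverse ++ pvRep2 x y nu l := by
  intro fuel
  induction fuel with
  | zero => intro l acc h; simp at h; subst h; simp [PySem.Chars.replace.go, pvRep2]
  | succ n ih =>
    intro l acc h
    cases l with
    | nil => simp [PySem.Chars.replace.go, pvRep2]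
    | cons c t =>
      cases t with
      | nil =>
        have : List.isPrefixOf [x, y] [c] = false := by simp [List.isPrefixOf]
        simp only [PySem.Chars.replace.go, this, Bool.false_eq_true, if_false, pvRep2]
        rw [ih [] _ (by simp)]
        simp [pvRep2]
      | cons b t2 =>
        simp only [List.length_cons] at h
        by_cases hm : c = x ∧ b = y
        · have hp : List.isPrefixOf [x, y] (c :: b :: t2) = true := by
            simp [List.isPrefixOf, hm.1, hm.2]
          simp only [PySem.Chars.replace.go, hp, if_true, pvRep2, if_pos hm]
          have hd : List.drop ([x, y].length) (c :: b :: t2) = t2 := by simp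
          rw [hd, ih t2 _ (by omega)]
          simp
        · have hp : List.isPrefixOf [x, y] (c :: b :: t2) = false := by
            simp [List.isPrefixOf]
            intro hc hb; exact hm ⟨hc.symm, hb.symm⟩
          simp only [PySem.Chars.replace.go, hp, Bool.false_eq_true, if_false, pvRep2, if_neg hm]
          rw [ih (b :: t2) _ (by simp; omega)]
          simp

theorem replace_one (x : Char) (nu l : List Char) :
    PySem.Chars.replace l [x] nu = pvRep1 x nu l := by
  simp only [PySem.Chars.replace, List.isEmpty]
  exact pvRep1_go x nu l.length l [] (le_refl _)

theorem replace_two (x y : Char) (nu l : List Char) :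
    PySem.Chars.replace l [x, y] nu = pvRep2 x y nu l := by
  simp only [PySem.Chars.replace, List.isEmpty]
  exact pvRep2_go x y nu l.length l [] (le_refl _)

theorem pvRep2_cons_ne (x y : Char) (nu : List Char) (a : Char) (r : List Char) (h : a ≠ x) :
    pvRep2 x y nu (a :: r) = a :: pvRep2 x y nu r := by
  cases r with
  | nil => simp [pvRep2]
  | cons b t => simp [pvRep2, h]

theorem pvScanS_cons_ne (S : List Char) (a : Char) (r : List Char) (h : a ≠ '\\') :
    pvScanS S (a :: r) = a :: pvScanS S r := by
  cases r with
  | nil => simp [pvScanS]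
  | cons b t => simp [pvScanS, h]

theorem pvScanS_nil (l : List Char) : pvScanS [] l = l := by
  induction l with
  | nil => simp [pvScanS]
  | cons a r ih =>
    cases r with
    | nil => simp [pvScanS]
    | cons b t => simpa [pvScanS] using ih

-- the key composition lemma: unescaping one more character after a scan over S is a scan over S ++ [c]
theorem pvScanS_step (c : Char) (S : List Char)
    (hc : c ≠ '\\') (hcS : c ∉ S) (hS : '\\' ∉ S) :
    ∀ l, pvRep2 '\\' c [c] (pvScanS S l) = pvScanS (S ++ [c]) l := by
  intro l
  induction hn : l.length using Nat.strong_induction_on generalizing l with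
  | _ n ih =>
  subst hn
  match l with
  | [] => simp [pvScanS, pvRep2]
  | [a] => simp [pvScanS, pvRep2]
  | a :: b :: t =>
    by_cases ha : a = '\\'
    · subst ha
      by_cases hb : b ∈ S
      · have hbne : b ≠ '\\' := fun h => hS (h ▸ hb)
        have hbc : b ≠ c := fun h => hcS (h ▸ hb)
        rw [show pvScanS S ('\\' :: b :: t) = b :: pvScanS S t by simp [pvScanS, hb]]
        rw [pvRep2_cons_ne _ _ _ _ _ hbne, ih t.length (by simp) t rfl]
        simp [pvScanS, hb]
      · by_cases hbc : b = c
        · subst hbc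
          rw [show pvScanS S ('\\' :: b :: t) = '\\' :: pvScanS S (b :: t) by simp [pvScanS, hb]]
          rw [pvScanS_cons_ne S b t hc]
          rw [show pvRep2 '\\' b [b] ('\\' :: b :: pvScanS S t) = b :: pvRep2 '\\' b [b] (pvScanS S t) by
            simp [pvRep2]]
          rw [ih t.length (by simp) t rfl]
          simp [pvScanS]
        · rw [show pvScanS S ('\\' :: b :: t) = '\\' :: pvScanS S (b :: t) by simp [pvScanS, hb]]
          by_cases hbb : b = '\\'
          · subst hbb
            match t with
            | [] =>
              simp [pvScanS, pvRep2, hS, hbc]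
            | d :: t2 =>
              by_cases hd : d ∈ S
              · have hdne : d ≠ '\\' := fun h => hS (h ▸ hd)
                have hdc : d ≠ c := fun h => hcS (h ▸ hd)
                rw [show pvScanS S ('\\' :: d :: t2) = d :: pvScanS S t2 by simp [pvScanS, hd]]
                rw [show pvRep2 '\\' c [c] ('\\' :: d :: pvScanS S t2)
                      = '\\' :: pvRep2 '\\' c [c] (d :: pvScanS S t2) by simp [pvRep2, hdc]]
                rw [pvRep2_cons_ne _ _ _ _ _ hdne, ih t2.length (by simp; omega) t2 rfl]
                simp [pvScanS, hS, hcS, hbc, hd]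
              · rw [show pvScanS S ('\\' :: d :: t2) = '\\' :: pvScanS S (d :: t2) by simp [pvScanS, hd]]
                rw [show pvRep2 '\\' c [c] ('\\' :: '\\' :: pvScanS S (d :: t2))
                      = '\\' :: pvRep2 '\\' c [c] ('\\' :: pvScanS S (d :: t2)) by
                    simp [pvRep2, hbc]]
                rw [show ('\\' :: pvScanS S (d :: t2)) = pvScanS S ('\\' :: d :: t2) by
                    simp [pvScanS, hd]]
                rw [ih ('\\' :: d :: t2).length (by simp) _ rfl]
                simp [pvScanS, hS, hcS, hbc]
          · rw [pvScanS_cons_ne S b t hbb]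
            rw [show pvRep2 '\\' c [c] ('\\' :: b :: pvScanS S t)
                  = '\\' :: pvRep2 '\\' c [c] (b :: pvScanS S t) by simp [pvRep2, hbc]]
            rw [← pvScanS_cons_ne S b t hbb, ih (b :: t).length (by simp) _ rfl]
            have hbS' : b ∉ S ++ [c] := by simp [hb, hbc]
            simp [pvScanS, hbS']
    · rw [show pvScanS S (a :: b :: t) = a :: pvScanS S (b :: t) by simp [pvScanS, ha]]
      rw [pvRep2_cons_ne _ _ _ _ _ ha, ih (b :: t).length (by simp) _ rfl]
      simp [pvScanS, ha]

theorem rep1_filter (x : Char) (l : List Char) :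
    pvRep1 x [] l = l.filter (fun a => !(a == x)) := by
  induction l with
  | nil => simp [pvRep1]
  | cons a t ih =>
    by_cases h : a = x
    · subst h; simp [pvRep1, ih]
    · simp [pvRep1, h, ih]

theorem rep2_pair_filter (x : Char) :
    ∀ l, (pvRep2 x x [] l).filter (fun a => !(a == x)) = l.filter (fun a => !(a == x)) := by
  intro l
  induction hn : l.length using Nat.strong_induction_on generalizing l with
  | _ n ih =>
  subst hn
  match l with
  | [] => simp [pvRep2]
  | [a] => simp [pvRep2]
  | a :: b :: t =>
    by_cases h : a = x ∧ b = x
    · obtain ⟨h1, h2⟩ := h; subst h1; subst h2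
      simp only [pvRep2, and_self, if_true, List.nil_append]
      rw [ih t.length (by simp) t rfl]
      simp
    · simp only [pvRep2, if_neg h]
      rw [List.filter_cons, List.filter_cons]
      rw [ih (b :: t).length (by simp) _ rfl]

-- Source B's fused scan equals: scan over the full class, then drop '*' and '_'
theorem pvScanB_eq (l : List Char) :
    pvScanB l = (pvScanS pvEsc l).filter (fun a => !(a == '*') && !(a == '_')) := by
  induction hn : l.length using Nat.strong_induction_on generalizing l with
  | _ n ih =>
  subst hn
  match l with
  | [] => simp [pvScanB, pvScanS]
  | [a] =>
    by_cases h : a = '*' ∨ a = '_'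
    · rcases h with h | h <;> (subst h; simp [pvScanB, pvScanS])
    · push_neg at h
      simp [pvScanB, pvScanS, h.1, h.2, not_or.mpr h]
  | a :: b :: t =>
    by_cases hm : a = '\\' ∧ b ∈ pvEsc
    · rw [show pvScanS pvEsc (a :: b :: t) = b :: pvScanS pvEsc t by simp [pvScanS, hm.1, hm.2]]
      rw [show pvScanB (a :: b :: t)
            = if b = '*' ∨ b = '_' then pvScanB t else b :: pvScanB t by simp [pvScanB, hm.1, hm.2]]
      rw [ih t.length (by simp) t rfl]
      by_cases hb : b = '*' ∨ b = '_'
      · rcases hb with hb | hb <;> (subst hb; simp)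
      · push_neg at hb
        simp [List.filter_cons, hb.1, hb.2, not_or.mpr hb]
    · rw [show pvScanS pvEsc (a :: b :: t) = a :: pvScanS pvEsc (b :: t) by simp [pvScanS, hm]]
      rw [show pvScanB (a :: b :: t)
            = if a = '*' ∨ a = '_' then pvScanB (b :: t) else a :: pvScanB (b :: t) by
          simp [pvScanB, hm]]
      rw [ih (b :: t).length (by simp) _ rfl]
      by_cases hb : a = '*' ∨ a = '_'
      · rcases hb with hb | hb <;> (subst hb; simp)
      · push_neg at hb
        simp [List.filter_cons, hb.1, hb.2, not_or.mpr hb]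

-- A's header loop equals the filterMap over pvCleanLine
theorem foldl_header (ls : List (List Char)) :
    ∀ acc, ls.foldl (fun acc line =>
      if PySem.Chars.startswith (PySem.Chars.strip line) ['#'] then
        let header := PySem.Chars.strip (line.dropWhile (· == '#'))
        if header ≠ [] then acc ++ [header] else acc
      else acc ++ [line]) acc = acc ++ ls.filterMap pvCleanLine := by
  induction ls with
  | nil => intro acc; simp
  | cons line rest ih =>
    intro acc
    simp only [List.foldl_cons, List.filterMap_cons]
    by_cases hs : PySem.Chars.startswith (PySem.Chars.strip line) ['#'] = true
    · by_cases hh : PySem.Chars.strip (line.dropWhile (· == '#')) = []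
      · simp only [hs, if_true, hh, ne_eq, not_true_eq_false, if_false, pvCleanLine, ih]
      · simp only [hs, if_true, ne_eq, hh, not_false_eq_true, pvCleanLine, if_false, ih,
          List.append_assoc, List.singleton_append]
    · simp only [Bool.not_eq_true] at hs
      simp only [hs, Bool.false_eq_true, if_false, pvCleanLine, ih, List.append_assoc,
        List.singleton_append]

-- ===== VERDICT (by name: the statement is the Claim_ definition above) =====
theorem clean_ai_response_py_spec : Claim_equal_clean_ai_response_py := by
  intro text _
  unfold Spec_clean_ai_response_py
  by_cases he : text = ""
  · subst he; rfl
  · simp only [clean_ai_response_py, clean_ai_response_py_alt, if_neg he]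
    refine congrArg String.ofList (congrArg (PySem.Chars.join ['\n']) ?_)
    rw [foldl_header]
    simp only [List.nil_append]
    refine congrArg (List.filterMap pvCleanLine)
      (congrArg (fun m => PySem.Chars.splitOn m ['\n']) ?_)
    rw [pvScanB_eq]
    simp only [replace_one, replace_two]
    -- escape chain: fold the 13 unescapes into one scan
    have h0 := pvScanS_nil text.toList
    rw [show pvScanS pvEsc text.toList
          = pvRep2 '\\' '|' ['|'] (pvRep2 '\\' '!' ['!'] (pvRep2 '\\' '.' ['.']
              (pvRep2 '\\' '-' ['-'] (pvRep2 '\\' '+' ['+'] (pvRep2 '\\' '#' ['#']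
              (pvRep2 '\\' ')' [')'] (pvRep2 '\\' '(' ['('] (pvRep2 '\\' ']' [']']
              (pvRep2 '\\' '[' ['['] (pvRep2 '\\' '`' ['`'] (pvRep2 '\\' '_' ['_']
              (pvRep2 '\\' '*' ['*'] (pvRep2 '\\' '/' ['/'] text.toList))))))))))))) from ?_]
    · -- stage 2: pair deletes then single deletes equal a single filter
      generalize (pvRep2 '\\' '|' ['|'] _) = m
      rw [rep1_filter, rep1_filter]
      rw [List.filter_filter]
      have c1 : ∀ X : List Char, (pvRep2 '_' '_' [] X).filter (fun a => !(a == '_') && !(a == '*'))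
          = X.filter (fun a => !(a == '_') && !(a == '*')) := by
        intro X
        rw [show (fun a : Char => !(a == '_') && !(a == '*'))
              = (fun a => (fun b : Char => !(b == '*')) a && (fun b : Char => !(b == '_')) a) from ?_]
        · rw [← List.filter_filter, rep2_pair_filter, List.filter_filter]
        · funext a; rw [Bool.and_comm]
      have c2 : ∀ X : List Char, (pvRep2 '*' '*' [] X).filter (fun a => !(a == '_') && !(a == '*'))
          = X.filter (fun a => !(a == '_') && !(a == '*')) := by
        intro X
        rw [← List.filter_filter, rep2_pair_filter, List.filter_filter]
      rw [c1, c2]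
      congr 1
      funext a; rw [Bool.and_comm]
    · -- build up the scan set one character at a time
      rw [← h0]
      rw [pvScanS_step '/' [] (by decide) (by decide) (by decide)]
      simp only [List.cons_append, List.nil_append]
      rw [pvScanS_step '*' ['/'] (by decide) (by decide) (by decide)]
      simp only [List.cons_append, List.nil_append]
      rw [pvScanS_step '_' ['/', '*'] (by decide) (by decide) (by decide)]
      simp only [List.cons_append, List.nil_append]
      rw [pvScanS_step '`' ['/', '*', '_'] (by decide) (by decide) (by decide)]
      simp only [List.cons_append, List.nil_append]
      rw [pvScanS_step '[' ['/', '*', '_', '`'] (by decide) (by decide) (by decide)]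
      simp only [List.cons_append, List.nil_append]
      rw [pvScanS_step ']' ['/', '*', '_', '`', '['] (by decide) (by decide) (by decide)]
      simp only [List.cons_append, List.nil_append]
      rw [pvScanS_step '(' ['/', '*', '_', '`', '[', ']'] (by decide) (by decide) (by decide)]
      simp only [List.cons_append, List.nil_append]
      rw [pvScanS_step ')' ['/', '*', '_', '`', '[', ']', '('] (by decide) (by decide) (by decide)]
      simp only [List.cons_append, List.nil_append]
      rw [pvScanS_step '#' ['/', '*', '_', '`', '[', ']', '(', ')'] (by decide) (by decide) (by decide)]
      simp only [List.cons_append, List.nil_append]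
      rw [pvScanS_step '+' ['/', '*', '_', '`', '[', ']', '(', ')', '#'] (by decide) (by decide) (by decide)]
      simp only [List.cons_append, List.nil_append]
      rw [pvScanS_step '-' ['/', '*', '_', '`', '[', ']', '(', ')', '#', '+'] (by decide) (by decide) (by decide)]
      simp only [List.cons_append, List.nil_append]
      rw [pvScanS_step '.' ['/', '*', '_', '`', '[', ']', '(', ')', '#', '+', '-'] (by decide) (by decide) (by decide)]
      simp only [List.cons_append, List.nil_append]
      rw [pvScanS_step '!' ['/', '*', '_', '`', '[', ']', '(', ')', '#', '+', '-', '.'] (by decide) (by decide) (by decide)]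
      simp only [List.cons_append, List.nil_append]
      rw [pvScanS_step '|' ['/', '*', '_', '`', '[', ']', '(', ')', '#', '+', '-', '.', '!'] (by decide) (by decide) (by decide)]
      simp only [List.cons_append, List.nil_append]
      rw [h0]
      rfl
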